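-- pv_equiv track=rewrite | github.com/AlperenKaracan/kullanici_ilgi_alanlari_analizi | benzerKelimeler/benzerKelimeler.py | kategorize_et_ve_kelime_getir
-- ===== SOURCE A (Python) =====
-- def kategorize_et_ve_kelime_getir(kelime_listesi, ilgi_alanlari):
--     kategori_en_yuksek_kelime = {}
--
--     for kelime,frekans in kelime_listesi:
--
--         for kategori, anahtar_kelimeler in ilgi_alanlari.items():
--             if kelime in anahtar_kelimeler:
--
--                 if kategori in kategori_en_yuksek_kelime:
--                     # Mevcut kategoride daha yüksek frekansa sahip bir kelime varsa güncelleme kısmı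
--                     if frekans > kategori_en_yuksek_kelime[kategori][1]:
--                         kategori_en_yuksek_kelime[kategori] = (kelime, frekans)
--                 else:
--                     kategori_en_yuksek_kelime[kategori] = (kelime, frekans)
--                     break
--
--
--     return kategori_en_yuksek_kelime
-- ===== SOURCE B (Python) =====
-- def _guncelle(sonuc, kategoriler, kelime, frekans):
--     # Apply one word to the categories that contain it, with A's break semantics:
--     # stop at the first category not seen yet.
--     for kategori in kategoriler:
--         mevcut = sonuc.get(kategori)
--         if mevcut is None:
--             sonuc[kategori] = (kelime, frekans)
--             return
--         if frekans > mevcut[1]: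
--             sonuc[kategori] = (kelime, frekans)
--
--
-- def kategorize_et_ve_kelime_getir(kelime_listesi, ilgi_alanlari):
--     # Reverse index: keyword -> categories containing it, in dict order.
--     indeks = {}
--     for kategori, anahtar_kelimeler in ilgi_alanlari.items():
--         for anahtar in dict.fromkeys(anahtar_kelimeler):
--             indeks.setdefault(anahtar, []).append(kategori)
--
--     sonuc = {}
--     for kelime, frekans in kelime_listesi:
--         _guncelle(sonuc, indeks.get(kelime, ()), kelime, frekans)
--     return sonuc
-- ===== Notes on version B (the rewrite author's own statement) =====
-- stated objective: faster
-- what changed: B builds a reverse index keyword->ordered category list once, so each word visits only the categories that actually contain it (preserving A's insertion, update and break semantics) instead of scanning every category's keyword list per word.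
import Mathlib
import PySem

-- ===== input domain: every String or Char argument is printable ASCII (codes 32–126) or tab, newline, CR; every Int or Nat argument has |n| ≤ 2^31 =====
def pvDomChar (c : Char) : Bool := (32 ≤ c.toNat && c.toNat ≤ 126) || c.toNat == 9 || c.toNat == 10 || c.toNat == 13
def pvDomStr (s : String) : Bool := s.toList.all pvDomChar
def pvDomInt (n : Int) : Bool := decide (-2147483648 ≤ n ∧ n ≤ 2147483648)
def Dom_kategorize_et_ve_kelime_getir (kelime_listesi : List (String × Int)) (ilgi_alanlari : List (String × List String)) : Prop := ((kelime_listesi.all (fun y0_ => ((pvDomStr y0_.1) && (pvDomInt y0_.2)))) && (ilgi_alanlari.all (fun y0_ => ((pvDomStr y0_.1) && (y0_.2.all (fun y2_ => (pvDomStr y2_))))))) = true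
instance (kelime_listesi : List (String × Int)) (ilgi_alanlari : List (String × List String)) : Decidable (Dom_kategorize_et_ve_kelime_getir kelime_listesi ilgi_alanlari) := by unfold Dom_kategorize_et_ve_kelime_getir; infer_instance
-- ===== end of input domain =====

-- B replaces A's scan of every category per word by a reverse index keyword → categories
-- built once, keeping A's insertion/update/break semantics; objective: faster (measured).

-- ===== PORT A =====
-- the inner 'for kategori, anahtar_kelimeler in ilgi_alanlari.items():' loop with its break
def pvInnerA (kelime : String) (frekans : Int) :
    List (String × List String) → PySem.Dict String (String × Int) → PySem.Dict String (String × Int)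
  | [], d => d
  | (kategori, anahtar_kelimeler) :: rest, d =>
    if anahtar_kelimeler.contains kelime then
      match d.get? kategori with
      | some p =>
        pvInnerA kelime frekans rest (if frekans > p.2 then d.insert kategori (kelime, frekans) else d)
      | none => d.insert kategori (kelime, frekans)   -- break: stop scanning categories
    else pvInnerA kelime frekans rest d

def kategorize_et_ve_kelime_getir (kelime_listesi : List (String × Int)) (ilgi_alanlari : List (String × List String)) : List (String × String × Int) :=
  (kelime_listesi.foldl (fun d kf => pvInnerA kf.1 kf.2 ilgi_alanlari d) PySem.Dict.empty).items

-- ===== PORT B =====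
-- indeks.setdefault(anahtar, []).append(kategori)  =  modify anahtar [] (· ++ [kategori])
def pvBuildIndex (ilgi_alanlari : List (String × List String)) : PySem.Dict String (List String) :=
  ilgi_alanlari.foldl
    (fun d kv => (PySem.List.dedup kv.2).foldl (fun d a => d.modify a [] (· ++ [kv.1])) d)
    PySem.Dict.empty

-- helper _guncelle: apply one word to its category list, stopping at the first unseen category
def pvGuncelle (kelime : String) (frekans : Int) :
    List String → PySem.Dict String (String × Int) → PySem.Dict String (String × Int)
  | [], sonuc => sonuc
  | kategori :: rest, sonuc =>
    match sonuc.get? kategori with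
    | none => sonuc.insert kategori (kelime, frekans)   -- return
    | some mevcut =>
      pvGuncelle kelime frekans rest
        (if frekans > mevcut.2 then sonuc.insert kategori (kelime, frekans) else sonuc)

def kategorize_et_ve_kelime_getir_alt (kelime_listesi : List (String × Int)) (ilgi_alanlari : List (String × List String)) : List (String × String × Int) :=
  let indeks := pvBuildIndex ilgi_alanlari
  (kelime_listesi.foldl (fun d kf => pvGuncelle kf.1 kf.2 (indeks.getD kf.1 []) d) PySem.Dict.empty).items

-- ===== PRECONDITION & SPEC =====
def Spec_kategorize_et_ve_kelime_getir (kelime_listesi : List (String × Int)) (ilgi_alanlari : List (String × List String)) (out : List (String × String × Int)) : Prop := out = kategorize_et_ve_kelime_getir_alt kelime_listesi ilgi_alanlari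
instance (kelime_listesi : List (String × Int)) (ilgi_alanlari : List (String × List String)) (out : List (String × String × Int)) : Decidable (Spec_kategorize_et_ve_kelime_getir kelime_listesi ilgi_alanlari out) := by unfold Spec_kategorize_et_ve_kelime_getir; infer_instance

-- ===== CLAIM (what is proved, stated in full; the proofs are below) =====
def Claim_equal_kategorize_et_ve_kelime_getir : Prop := ∀ (kelime_listesi : List (String × Int)) (ilgi_alanlari : List (String × List String)), Dom_kategorize_et_ve_kelime_getir kelime_listesi ilgi_alanlari → Spec_kategorize_et_ve_kelime_getir kelime_listesi ilgi_alanlari (kategorize_et_ve_kelime_getir kelime_listesi ilgi_alanlari)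

-- ===== LEMMAS AND PROOFS =====

-- the categories whose keyword list contains w, in order (what A's inner loop sees)
def pvCats (w : String) (ilgi : List (String × List String)) : List String :=
  (ilgi.filter (fun p => p.2.contains w)).map (·.1)

theorem pv_filter_beq_nodup (w : String) (l : List String) (h : l.Nodup) :
    l.filter (fun a => a == w) = if w ∈ l then [w] else [] := by
  induction l with
  | nil => simp
  | cons x xs ih =>
    rcases List.nodup_cons.mp h with ⟨hx, hxs⟩
    by_cases hxw : x = w
    · subst hxw
      simp [ih hxs, hx]
    · simp [hxw, ih hxs, Ne.symm hxw]

theorem pv_index_getD (w : String) (ilgi : List (String × List String))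
    (d : PySem.Dict String (List String)) :
    (ilgi.foldl
      (fun d kv => (PySem.List.dedup kv.2).foldl (fun d a => d.modify a [] (· ++ [kv.1])) d)
      d).getD w []
    = d.getD w [] ++ pvCats w ilgi := by
  induction ilgi generalizing d with
  | nil => simp [pvCats]
  | cons kv rest ih =>
    obtain ⟨kat, kws⟩ := kv
    rw [List.foldl_cons, ih]
    have hmap : (PySem.List.dedup kws).foldl (fun d a => d.modify a [] (· ++ [kat])) d
        = ((PySem.List.dedup kws).map (fun a => (a, kat))).foldl
            (fun d p => d.modify p.1 [] (· ++ [p.2])) d := by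
      rw [List.foldl_map]
    rw [hmap, PySem.Dict.getD_foldl_modify_append]
    have hfil : ((PySem.List.dedup kws).map (fun a => (a, kat))).filter (fun p => p.1 == w)
        = ((PySem.List.dedup kws).filter (fun a => a == w)).map (fun a => (a, kat)) := by
      rw [List.filter_map]; rfl
    rw [hfil, pv_filter_beq_nodup w _ (PySem.List.nodup_dedup kws)]
    by_cases hw : w ∈ kws
    · simp [pvCats, hw]
    · simp [pvCats, hw]

theorem pv_inner_eq (w : String) (f : Int) (ilgi : List (String × List String))
    (d : PySem.Dict String (String × Int)) :
    pvInnerA w f ilgi d = pvGuncelle w f (pvCats w ilgi) d := by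
  induction ilgi generalizing d with
  | nil => simp [pvInnerA, pvGuncelle, pvCats]
  | cons kv rest ih =>
    obtain ⟨kat, kws⟩ := kv
    by_cases hc : kws.contains w
    · simp only [pvInnerA, hc, if_true, pvCats, List.filter_cons, List.map_cons]
      show _ = pvGuncelle w f (kat :: pvCats w rest) d
      unfold pvGuncelle
      cases d.get? kat with
      | some p => exact ih _
      | none => rfl
    · simp only [pvInnerA, hc, pvCats, List.filter_cons]
      exact ih d

-- ===== VERDICT (by name: the statement is the Claim_ definition above) =====
theorem kategorize_et_ve_kelime_getir_spec : Claim_equal_kategorize_et_ve_kelime_getir := by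
  intro kl ia _
  unfold Spec_kategorize_et_ve_kelime_getir
  unfold kategorize_et_ve_kelime_getir kategorize_et_ve_kelime_getir_alt
  have hf : (fun (d : PySem.Dict String (String × Int)) (kf : String × Int) => pvInnerA kf.1 kf.2 ia d)
      = fun d kf => pvGuncelle kf.1 kf.2 ((pvBuildIndex ia).getD kf.1 []) d := by
    funext d kf
    rw [pvBuildIndex, pv_index_getD, PySem.Dict.getD_empty, List.nil_append, pv_inner_eq]
  rw [hf]
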